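-- pv_equiv track=rewrite | github.com/zahidzqj/learn_python | 词典中频率为1.py | find_word_count
-- ===== SOURCE A (Python) =====
-- def find_word_count(words):
-- 	words_count={}
-- 	for word in words:
-- 		if word in words_count:#words_count.keys()
-- 			words_count[word] +=1
-- 		else:
-- 			words_count[word] = 1
-- 		#words_count[word] = words_count.get(word,0)+1
-- 	for word in words:
-- 		if words_count[word] == 1:
-- 			return words.index(word)
-- ===== SOURCE B (Python) =====
-- def find_word_count(words):
--     seen_again = set()
--     candidates = {}  # word -> index of its first (and so far only) occurrence
--     for i, word in enumerate(words):
--         if word in seen_again: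
--             continue
--         if word in candidates:
--             del candidates[word]
--             seen_again.add(word)
--         else:
--             candidates[word] = i
--     for idx in candidates.values():
--         return idx
--     return None
-- ===== Notes on version B (the rewrite author's own statement) =====
-- stated objective: alternative
-- what changed: B never counts: it streams the list once, keeping an ordered dict of still-unique words (deleting a word from it and blacklisting it the moment it reappears), so the answer is just the first surviving value, whereas A builds a count table, rescans the whole list and calls words.index().
import Mathlib
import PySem

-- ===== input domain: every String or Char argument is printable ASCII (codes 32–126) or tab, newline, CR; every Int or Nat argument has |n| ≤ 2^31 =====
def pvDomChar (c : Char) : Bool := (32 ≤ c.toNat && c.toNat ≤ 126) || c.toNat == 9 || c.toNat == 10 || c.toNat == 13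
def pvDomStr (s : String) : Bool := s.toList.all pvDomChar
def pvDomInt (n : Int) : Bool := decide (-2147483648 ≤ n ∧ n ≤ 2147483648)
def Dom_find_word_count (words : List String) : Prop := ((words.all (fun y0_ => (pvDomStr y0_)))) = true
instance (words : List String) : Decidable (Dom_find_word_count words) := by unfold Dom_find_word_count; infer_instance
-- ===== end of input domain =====

-- B never counts: it streams the list once, deleting a word from an ordered dict of still-unique
-- words the moment it reappears, and returns the first surviving value (objective: alternative).

-- ===== PORT A =====
-- first loop of A: build words_count
def fwcCount (words : List String) : PySem.Dict String Int :=
  words.foldl (fun d word =>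
    if d.contains word then d.insert word (d.getD word 0 + 1) else d.insert word 1)
    PySem.Dict.empty

-- second loop of A; `words_count[word]` is ported as getD 0, exact here because every
-- word of the scanned list is a key of words_count (no KeyError is reachable)
def fwcFind (all : List String) (d : PySem.Dict String Int) : List String → Option Int
  | [] => none
  | word :: rest =>
    if d.getD word 0 == 1 then (PySem.List.index? all word).map (fun n => (n : Int))
    else fwcFind all d rest

def find_word_count (words : List String) : Option Int :=
  fwcFind words (fwcCount words) words

-- ===== PORT B =====
-- B's loop body: skip blacklisted words; delete-and-blacklist on second sight; record index on first sight
def fwcStep (st : PySem.Dict String Int × PySem.Set String) (p : Int × String) :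
    PySem.Dict String Int × PySem.Set String :=
  if st.2.contains p.2 then st
  else if st.1.contains p.2 then (st.1.erase p.2, st.2.add p.2)
  else (st.1.insert p.2 p.1, st.2)

-- B's final 'for idx in candidates.values(): return idx / return None'
def find_word_count_alt (words : List String) : Option Int :=
  match ((PySem.List.enumerate words).foldl fwcStep (PySem.Dict.empty, PySem.Set.empty)).1.values with
  | [] => none
  | idx :: _ => some idx

-- ===== PRECONDITION & SPEC =====
def Spec_find_word_count (words : List String) (out : Option Int) : Prop := out = find_word_count_alt words
instance (words : List String) (out : Option Int) : Decidable (Spec_find_word_count words out) := by unfold Spec_find_word_count; infer_instance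

-- ===== CLAIM (what is proved, stated in full; the proofs are below) =====
def Claim_equal_find_word_count : Prop := ∀ (words : List String), Dom_find_word_count words → Spec_find_word_count words (find_word_count words)

-- ===== LEMMAS AND PROOFS =====

-- the common reference value: the first word of `words` occurring exactly once, sent to its first index
def fwcRef (words : List String) : Option Int :=
  (words.find? (fun w => List.count w words == 1)).map
    (fun w => (((PySem.List.index? words w).getD 0 : Nat) : Int))

lemma fwc_getD_zero_of_not_contains (d : PySem.Dict String Int) (w : String)
    (h : d.contains w = false) : d.getD w 0 = 0 := by
  rw [PySem.Dict.contains_eq_isSome_get?] at h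
  simp only [PySem.Dict.getD]
  cases hg : d.get? w with
  | none => rfl
  | some v => rw [hg] at h; simp at h

lemma fwcCount_eq_counter (words : List String) : fwcCount words = PySem.Dict.counter words := by
  unfold fwcCount
  rw [← PySem.Dict.foldl_insert_getD_add_one_eq_counter]
  congr 1
  funext d word
  by_cases h : d.contains word = true
  · simp [h]
  · simp only [Bool.not_eq_true] at h
    rw [fwc_getD_zero_of_not_contains d word h]
    simp [h]

lemma fwc_find?_first {α : Type} (p : α → Bool) (pre : List α) (w : α) (rest : List α)
    (hnone : ∀ x ∈ pre, ¬ p x = true) (hp : p w = true) :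
    List.find? p (pre ++ w :: rest) = some w := by
  rw [List.find?_append, List.find?_eq_none.mpr hnone]
  exact List.find?_cons_of_pos hp

lemma fwcFind_eq (words : List String) : ∀ (ws pre : List String),
    words = pre ++ ws → (∀ x ∈ pre, ¬ (List.count x words = 1)) →
    fwcFind words (PySem.Dict.counter words) ws = fwcRef words := by
  intro ws
  induction ws with
  | nil =>
    intro pre hall hpre
    have hn : List.find? (fun w => List.count w words == 1) words = none := by
      apply List.find?_eq_none.mpr
      intro x hx
      have hxp : x ∈ pre := by rw [hall, List.append_nil] at hx; exact hx
      simpa using hpre x hxp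
    simp [fwcFind, fwcRef, hn]
  | cons w rest ih =>
    intro pre hall hpre
    simp only [fwcFind]
    by_cases hq : List.count w words = 1
    · have hcond : ((PySem.Dict.counter words).getD w 0 == 1) = true := by
        rw [PySem.Dict.getD_counter]; simp [hq]
      rw [if_pos hcond]
      have hfind : List.find? (fun w => List.count w words == 1) words = some w := by
        have := fwc_find?_first (fun w => List.count w words == 1) pre w rest
          (fun x hx => by simpa using hpre x hx) (by simpa using hq)
        rw [← hall] at this
        exact this
      have hw : w ∈ words := by rw [hall]; simp
      obtain ⟨k, hk⟩ : ∃ k, PySem.List.index? words w = some k :=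
        Option.isSome_iff_exists.mp ((PySem.List.index?_isSome_iff words w).mpr hw)
      rw [fwcRef, hfind]
      rw [PySem.List.index?_eq_idxOf?] at hk
      simp [hk]
    · have hcond : ((PySem.Dict.counter words).getD w 0 == 1) = false := by
        rw [PySem.Dict.getD_counter]; simpa using hq
      rw [hcond]
      simp only [Bool.false_eq_true, if_false]
      apply ih (pre ++ [w]) (by rw [hall]; simp)
      intro x hx
      rcases List.mem_append.mp hx with h | h
      · exact hpre x h
      · simp at h; subst h; exact hq

lemma find_word_count_eq_ref (words : List String) : find_word_count words = fwcRef words := by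
  unfold find_word_count
  rw [fwcCount_eq_counter]
  exact fwcFind_eq words words [] rfl (by simp)

lemma dedup_append_singleton (xs : List String) (w : String) :
    PySem.List.dedup (xs ++ [w]) =
      if w ∈ xs then PySem.List.dedup xs else PySem.List.dedup xs ++ [w] := by
  simp only [PySem.List.dedup, PySem.Set.ofList, List.foldl_append, List.foldl_cons, List.foldl_nil]
  show PySem.Set.add _ w = _
  simp only [PySem.Set.add]
  have h0 : (PySem.Set.ofList xs) = List.foldl PySem.Set.add PySem.Set.empty xs := rfl
  rw [← h0]
  by_cases h : w ∈ xs
  · simp [PySem.Set.mem_ofList, h]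
  · simp [PySem.Set.mem_ofList, h]

lemma fwc_filter_fst (g : String → Int) (w : String) : ∀ (l : List String),
    List.filter (fun p => !(p.1 == w)) (l.map (fun u => (u, g u)))
      = (l.filter (fun u => !(u == w))).map (fun u => (u, g u)) := by
  intro l
  induction l with
  | nil => rfl
  | cons x l ih =>
    by_cases h : x = w
    · subst h; simp [ih]
    · have hx : (x == w) = false := by simp [h]
      simp [hx, ih]

-- B's loop state after consuming `words`
def fwcState (words : List String) : PySem.Dict String Int × PySem.Set String :=
  (PySem.List.enumerate words).foldl fwcStep (PySem.Dict.empty, PySem.Set.empty)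

-- invariant of B's single pass: the candidate dict lists exactly the so-far-unique words
-- (first-occurrence order, mapped to their first index), the blacklist the repeated ones
lemma fwcState_inv (words : List String) :
    (fwcState words).1.items = ((PySem.List.dedup words).filter
        (fun w => List.count w words == 1)).map
        (fun w => (w, (((PySem.List.index? words w).getD 0 : Nat) : Int)))
      ∧ ∀ w, w ∈ (fwcState words).2 ↔ 2 ≤ List.count w words := by
  induction words using List.reverseRecOn with
  | nil => exact ⟨rfl, by intro w; simp [fwcState, PySem.List.enumerate, PySem.Set.empty]⟩
  | append_singleton xs w ih =>
    obtain ⟨hitems, hdup⟩ := ih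
    have hstep : fwcState (xs ++ [w]) = fwcStep (fwcState xs) ((0 : Int) + xs.length, w) := by
      simp [fwcState, PySem.List.enumerate_append, PySem.List.enumerate]
    have hkeys : (fwcState xs).1.keys =
        (PySem.List.dedup xs).filter (fun u => List.count u xs == 1) := by
      simp only [PySem.Dict.keys, hitems, List.map_map]
      exact List.map_id _
    have hcand_mem : ∀ u, u ∈ (fwcState xs).1.keys ↔ (u ∈ xs ∧ List.count u xs = 1) := by
      intro u
      rw [hkeys, List.mem_filter, PySem.List.mem_dedup]
      simp
    by_cases hd : 2 ≤ List.count w xs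
    · -- third or later sight: blacklisted, state unchanged
      have hc : ((fwcState xs).2.contains w) = true :=
        (PySem.Set.contains_iff _ _).mpr ((hdup w).mpr hd)
      have hpos : 0 < List.count w xs := by omega
      have hmem : w ∈ xs := List.count_pos_iff.mp hpos
      rw [hstep]
      simp only [fwcStep, hc, if_true]
      constructor
      · rw [hitems, dedup_append_singleton, if_pos hmem]
        have hfil : ∀ u ∈ PySem.List.dedup xs,
            (List.count u (xs ++ [w]) == 1) = (List.count u xs == 1) := by
          intro u hu
          by_cases huw : u = w
          · subst huw
            have h1 : List.count u [u] = 1 := by simp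
            simp only [List.count_append, h1]
            rw [Bool.eq_iff_iff]
            simp only [beq_iff_eq]
            omega
          · simp [List.count_append, List.count_eq_zero.mpr (by simp [huw] : u ∉ [w])]
        rw [List.filter_congr hfil]
        apply List.map_congr_left
        intro u hu
        have humem : u ∈ xs := (PySem.List.mem_dedup xs u).mp ((List.mem_filter.mp hu).1)
        rw [PySem.List.index?_append_of_mem _ humem]
      · intro u
        rw [hdup u]
        by_cases huw : u = w
        · subst huw; simp only [List.count_append]; omega
        · simp [List.count_append, List.count_eq_zero.mpr (by simp [huw] : u ∉ [w])]
    · by_cases h1 : List.count w xs = 1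
      · -- second sight: delete from candidates, blacklist
        have hmem : w ∈ xs := List.count_pos_iff.mp (by omega)
        have hc2 : ((fwcState xs).2.contains w) = false := by
          rw [← Bool.not_eq_true, PySem.Set.contains_iff, hdup w]; omega
        have hc1 : ((fwcState xs).1.contains w) = true := by
          rw [PySem.Dict.contains_eq_decide_mem_keys, decide_eq_true_eq, hcand_mem]
          exact ⟨hmem, h1⟩
        rw [hstep]
        simp only [fwcStep, hc2, hc1, Bool.false_eq_true, if_false, if_true]
        constructor
        · show List.filter _ (fwcState xs).1.items = _
          rw [hitems, fwc_filter_fst, dedup_append_singleton, if_pos hmem, List.filter_filter]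
          have hfil : ∀ u ∈ PySem.List.dedup xs,
              (!(u == w) && (List.count u xs == 1)) = (List.count u (xs ++ [w]) == 1) := by
            intro u hu
            by_cases huw : u = w
            · subst huw
              simp [List.count_append, h1]
            · have : (u == w) = false := by simp [huw]
              simp only [this, Bool.not_false, Bool.true_and]
              simp [List.count_append, List.count_eq_zero.mpr (by simp [huw] : u ∉ [w])]
          rw [List.filter_congr hfil]
          apply List.map_congr_left
          intro u hu
          have humem : u ∈ xs := (PySem.List.mem_dedup xs u).mp ((List.mem_filter.mp hu).1)
          rw [PySem.List.index?_append_of_mem _ humem]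
        · intro u
          rw [PySem.Set.mem_add, hdup u]
          by_cases huw : u = w
          · subst huw; simp [List.count_append, h1]
          · simp [List.count_append, List.count_eq_zero.mpr (by simp [huw] : u ∉ [w]), huw]
      · -- first sight: record index
        have h0 : List.count w xs = 0 := by omega
        have hmem : w ∉ xs := List.count_eq_zero.mp h0
        have hc2 : ((fwcState xs).2.contains w) = false := by
          rw [← Bool.not_eq_true, PySem.Set.contains_iff, hdup w]; omega
        have hc1 : ((fwcState xs).1.contains w) = false := by
          rw [← Bool.not_eq_true, PySem.Dict.contains_eq_decide_mem_keys, decide_eq_true_eq, hcand_mem]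
          intro hh; exact hmem hh.1
        rw [hstep]
        simp only [fwcStep, hc2, hc1, Bool.false_eq_true, if_false]
        constructor
        · rw [PySem.Dict.items_insert_of_not_contains _ _ hc1, hitems,
            dedup_append_singleton, if_neg hmem]
          rw [List.filter_append]
          have hfil : ∀ u ∈ PySem.List.dedup xs,
              (List.count u (xs ++ [w]) == 1) = (List.count u xs == 1) := by
            intro u hu
            have huw : u ≠ w := fun h => hmem (h ▸ (PySem.List.mem_dedup xs u).mp hu)
            simp [List.count_append, List.count_eq_zero.mpr (by simp [huw] : u ∉ [w])]
          rw [List.filter_congr hfil]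
          have hwfil : List.filter (fun u => List.count u (xs ++ [w]) == 1) [w] = [w] := by
            simp [List.count_append, h0]
          rw [hwfil, List.map_append]
          congr 1
          · apply List.map_congr_left
            intro u hu
            have humem : u ∈ xs := (PySem.List.mem_dedup xs u).mp ((List.mem_filter.mp hu).1)
            rw [PySem.List.index?_append_of_mem _ humem]
          · simp only [List.map_cons, List.map_nil]
            rw [PySem.List.index?_append_singleton_self _ _ hmem]
            simp
        · intro u
          rw [hdup u]
          by_cases huw : u = w
          · subst huw; simp [List.count_append, h0]
          · simp [List.count_append, List.count_eq_zero.mpr (by simp [huw] : u ∉ [w])]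

lemma fwc_head_filter_map (p : String → Bool) (f : String → Int) : ∀ (l : List String),
    (match (l.filter p).map (fun w => f w) with
     | [] => (none : Option Int)
     | idx :: _ => some idx) = (l.find? p).map f := by
  intro l
  induction l with
  | nil => rfl
  | cons x l ih =>
    by_cases h : p x = true
    · simp [h, List.find?_cons_of_pos h]
    · simp only [Bool.not_eq_true] at h
      rw [List.filter_cons_of_neg (by simp [h]), List.find?_cons_of_neg (by simp [h])]
      exact ih

lemma find?_dedup (q : String → Bool) (ws : List String) :
    List.find? q (PySem.List.dedup ws) = List.find? q ws := by
  induction ws using List.reverseRecOn with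
  | nil => rfl
  | append_singleton xs w ih =>
    rw [dedup_append_singleton]
    by_cases h : w ∈ xs
    · rw [if_pos h, ih, List.find?_append]
      cases hf : List.find? q xs with
      | some a => rfl
      | none =>
        have hq : ¬ q w = true := List.find?_eq_none.mp hf w h
        rw [List.find?_cons_of_neg hq]
        rfl
    · rw [if_neg h, List.find?_append, List.find?_append, ih]

lemma find_word_count_alt_eq_ref (words : List String) :
    find_word_count_alt words = fwcRef words := by
  have hvals : ((fwcState words).1).values = ((PySem.List.dedup words).filter
      (fun w => List.count w words == 1)).map
      (fun w => (((PySem.List.index? words w).getD 0 : Nat) : Int)) := by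
    show ((fwcState words).1).items.map (fun p => p.2) = _
    rw [(fwcState_inv words).1, List.map_map]
    rfl
  show (match ((fwcState words).1).values with
        | [] => (none : Option Int)
        | idx :: _ => some idx) = fwcRef words
  rw [hvals, fwc_head_filter_map, find?_dedup]
  rfl

-- ===== VERDICT (by name: the statement is the Claim_ definition above) =====
theorem find_word_count_spec : Claim_equal_find_word_count := by
  intro words _
  unfold Spec_find_word_count
  rw [find_word_count_eq_ref, find_word_count_alt_eq_ref]
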